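-- pv_equiv track=rewrite | github.com/limanling/pathlm_schema | data_utils/preprocessors/ace/evaluate_path.py | get_schema_graph_neighbor_dict
-- ===== SOURCE A (Python) =====
-- from collections import defaultdict
--
-- def get_schema_graph_neighbor_dict(schema_edges):
--     edge_neighbors = defaultdict(set)
--     for edge_1 in schema_edges:
--         for edge_2 in schema_edges:
--             if edge_1 != edge_2:
--                 if edge_1.split(' ')[-1] == edge_2.split(' ')[0]:
--                     edge_neighbors[edge_1].add(edge_2)
--     return edge_neighbors
-- ===== SOURCE B (Python) =====
-- from collections import defaultdict
--
-- def get_schema_graph_neighbor_dict(schema_edges):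
--     # Index edges by their first token once, then a single pass over edges
--     # joins each edge with the bucket of its last token (no inner scan).
--     starts = defaultdict(list)
--     for edge in schema_edges:
--         starts[edge.split(' ')[0]].append(edge)
--     edge_neighbors = defaultdict(set)
--     for edge_1 in schema_edges:
--         for edge_2 in starts.get(edge_1.split(' ')[-1], ()):
--             if edge_1 != edge_2:
--                 edge_neighbors[edge_1].add(edge_2)
--     return edge_neighbors
-- ===== Notes on version B (the rewrite author's own statement) =====
-- stated objective: faster
-- what changed: Replaces the all-pairs double scan (splitting both edges in every pair) by a hash join: one pass builds an index from first token to the edges starting with it, then a single pass over edges looks up the bucket of each edge's last token, so the quadratic inner scan disappears.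
import Mathlib
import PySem

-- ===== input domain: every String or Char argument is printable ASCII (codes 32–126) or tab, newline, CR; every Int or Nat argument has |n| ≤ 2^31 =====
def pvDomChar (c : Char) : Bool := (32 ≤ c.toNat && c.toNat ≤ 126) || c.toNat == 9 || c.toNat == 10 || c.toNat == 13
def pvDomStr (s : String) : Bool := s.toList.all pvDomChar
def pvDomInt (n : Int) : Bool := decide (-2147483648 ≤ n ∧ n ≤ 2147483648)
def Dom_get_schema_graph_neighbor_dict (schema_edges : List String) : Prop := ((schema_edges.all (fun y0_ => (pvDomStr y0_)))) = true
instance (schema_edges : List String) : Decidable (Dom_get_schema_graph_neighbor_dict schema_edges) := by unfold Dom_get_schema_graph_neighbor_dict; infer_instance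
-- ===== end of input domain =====

-- B replaces A's all-pairs double scan by a first-token index built once, then a
-- single pass joining each edge with the bucket of its last token (objective: faster).


-- ===== PORT A =====
-- e.split(' '): the separator " " is non-empty, so split? is never none and the
-- result is a non-empty list — the defaults below are unreachable.
def pvSplit (e : String) : List String := (PySem.Str.split? e " ").getD []
def pvFirstTok (e : String) : String := (pvSplit e).headD ""   -- e.split(' ')[0]
def pvLastTok (e : String) : String := (pvSplit e).getLastD "" -- e.split(' ')[-1]

def get_schema_graph_neighbor_dict (schema_edges : List String) : List (String × List String) :=
  (schema_edges.foldl (fun d e1 =>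
      schema_edges.foldl (fun d e2 =>
        if e1 ≠ e2 then
          if pvLastTok e1 = pvFirstTok e2 then
            PySem.Dict.modify d e1 PySem.Set.empty (fun s => PySem.Set.add s e2)
          else d
        else d) d)
    (PySem.Dict.empty : PySem.Dict String (PySem.Set String))).items

-- ===== PORT B =====
def get_schema_graph_neighbor_dict_alt (schema_edges : List String) : List (String × List String) :=
  let starts : PySem.Dict String (List String) :=
    schema_edges.foldl (fun d e => PySem.Dict.modify d (pvFirstTok e) [] (fun l => l ++ [e]))
      PySem.Dict.empty
  (schema_edges.foldl (fun d e1 =>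
      (PySem.Dict.getD starts (pvLastTok e1) []).foldl (fun d e2 =>
        if e1 ≠ e2 then
          PySem.Dict.modify d e1 PySem.Set.empty (fun s => PySem.Set.add s e2)
        else d) d)
    (PySem.Dict.empty : PySem.Dict String (PySem.Set String))).items

-- ===== PRECONDITION & SPEC =====
def Spec_get_schema_graph_neighbor_dict (schema_edges : List String) (out : List (String × List String)) : Prop := out = get_schema_graph_neighbor_dict_alt schema_edges
instance (schema_edges : List String) (out : List (String × List String)) : Decidable (Spec_get_schema_graph_neighbor_dict schema_edges out) := by unfold Spec_get_schema_graph_neighbor_dict; infer_instance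

-- ===== CLAIM (what is proved, stated in full; the proofs are below) =====
def Claim_equal_get_schema_graph_neighbor_dict : Prop := ∀ (schema_edges : List String), Dom_get_schema_graph_neighbor_dict schema_edges → Spec_get_schema_graph_neighbor_dict schema_edges (get_schema_graph_neighbor_dict schema_edges)

-- ===== LEMMAS AND PROOFS =====

-- The first-token index characterised: its bucket at t is the filter of the edges.
theorem pv_starts_getD (es : List String) (d : PySem.Dict String (List String)) (t : String) :
    PySem.Dict.getD (es.foldl (fun d e => PySem.Dict.modify d (pvFirstTok e) [] (fun l => l ++ [e])) d) t []
      = PySem.Dict.getD d t [] ++ es.filter (fun e => pvFirstTok e == t) := by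
  induction es generalizing d with
  | nil => simp
  | cons e es ih =>
    rw [List.foldl_cons, List.filter_cons, ih]
    by_cases h : pvFirstTok e = t
    · subst h
      rw [PySem.Dict.getD_modify_self]
      simp
    · rw [PySem.Dict.getD_modify_of_ne _ _ _ (fun hc => h hc.symm)]
      simp [h]

-- A's inner scan over all edges equals the scan over the matching-first-token filter.
theorem pv_inner_filter (e1 : String) (es : List String)
    (d : PySem.Dict String (PySem.Set String)) :
    es.foldl (fun d e2 =>
        if e1 ≠ e2 then
          if pvLastTok e1 = pvFirstTok e2 then
            PySem.Dict.modify d e1 PySem.Set.empty (fun s => PySem.Set.add s e2)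
          else d
        else d) d
      = (es.filter (fun e2 => pvFirstTok e2 == pvLastTok e1)).foldl (fun d e2 =>
          if e1 ≠ e2 then
            PySem.Dict.modify d e1 PySem.Set.empty (fun s => PySem.Set.add s e2)
          else d) d := by
  rw [List.foldl_filter]
  congr 1
  funext d e2
  by_cases h2 : pvLastTok e1 = pvFirstTok e2
  · by_cases h1 : e1 = e2 <;> simp [h1, h2]
  · simp [beq_eq_false_iff_ne.mpr (fun hc => h2 hc.symm), h2]

-- ===== VERDICT (by name: the statement is the Claim_ definition above) =====
theorem get_schema_graph_neighbor_dict_spec : Claim_equal_get_schema_graph_neighbor_dict := by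
  intro schema_edges _
  unfold Spec_get_schema_graph_neighbor_dict
  unfold get_schema_graph_neighbor_dict get_schema_graph_neighbor_dict_alt
  have hstep : (fun (d : PySem.Dict String (PySem.Set String)) e1 =>
      schema_edges.foldl (fun d e2 =>
        if e1 ≠ e2 then
          if pvLastTok e1 = pvFirstTok e2 then
            PySem.Dict.modify d e1 PySem.Set.empty (fun s => PySem.Set.add s e2)
          else d
        else d) d)
    = (fun (d : PySem.Dict String (PySem.Set String)) e1 =>
      (PySem.Dict.getD
        (schema_edges.foldl (fun d e => PySem.Dict.modify d (pvFirstTok e) [] (fun l => l ++ [e]))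
          PySem.Dict.empty) (pvLastTok e1) []).foldl (fun d e2 =>
        if e1 ≠ e2 then
          PySem.Dict.modify d e1 PySem.Set.empty (fun s => PySem.Set.add s e2)
        else d) d) := by
    funext d e1
    rw [pv_inner_filter, pv_starts_getD]
    simp
  rw [hstep]
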